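-- pv_equiv track=rewrite | github.com/Amirmahdikahdouii/Python-Exercises | Q-34/34.py | calculate_floor
-- ===== SOURCE A (Python) =====
-- def calculate_floor(actions):
--     floor = 0
--     for char in actions:
--         if char == "U":
--             floor += 1
--         else:
--             floor -= 1
--     return floor
-- ===== SOURCE B (Python) =====
-- def calculate_floor(actions):
--     n = len(actions)
--     if n == 0:
--         return 0
--     if n == 1:
--         return 1 if actions[0] == "U" else -1
--     mid = n // 2
--     return calculate_floor(actions[:mid]) + calculate_floor(actions[mid:])
-- ===== Notes on version B (the rewrite author's own statement) =====
-- stated objective: alternative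
-- what changed: Replaces the left-to-right accumulator loop with a divide-and-conquer recursion: split the string in half, solve each half recursively, and add the two net displacements; correctness rests on additivity of the net floor change over concatenation.
import Mathlib
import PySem

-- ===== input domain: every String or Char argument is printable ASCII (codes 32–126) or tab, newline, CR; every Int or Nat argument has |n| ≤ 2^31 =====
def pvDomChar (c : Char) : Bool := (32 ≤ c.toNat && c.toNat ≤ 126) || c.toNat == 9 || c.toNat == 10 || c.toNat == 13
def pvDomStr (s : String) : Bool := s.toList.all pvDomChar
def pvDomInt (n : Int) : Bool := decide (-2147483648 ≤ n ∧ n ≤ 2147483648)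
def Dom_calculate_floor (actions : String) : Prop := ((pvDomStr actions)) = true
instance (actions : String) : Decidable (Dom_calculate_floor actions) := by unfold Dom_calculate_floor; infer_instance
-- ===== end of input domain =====

-- B replaces A's accumulator loop with a divide-and-conquer recursion (split in half, add the halves' net changes); same cost class, different decomposition.


-- ===== PORT A =====
def calculate_floor (actions : String) : Int :=
  actions.toList.foldl (fun floor char => if char == 'U' then floor + 1 else floor - 1) 0

-- ===== PORT B =====
-- B's recursion on string slices, ported over the character list (actions[:mid]/actions[mid:] = take/drop mid).
def pvDC : List Char → Int
  | [] => 0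
  | [c] => if c == 'U' then 1 else -1
  | a :: b :: rest =>
      let mid := (a :: b :: rest).length / 2
      pvDC ((a :: b :: rest).take mid) + pvDC ((a :: b :: rest).drop mid)
termination_by l => l.length
decreasing_by
  · simp [List.length_take]; omega
  · simp [List.length_drop]; omega

def calculate_floor_alt (actions : String) : Int := pvDC actions.toList

-- ===== PRECONDITION & SPEC =====
def Spec_calculate_floor (actions : String) (out : Int) : Prop := out = calculate_floor_alt actions
instance (actions : String) (out : Int) : Decidable (Spec_calculate_floor actions out) := by unfold Spec_calculate_floor; infer_instance

-- ===== CLAIM (what is proved, stated in full; the proofs are below) =====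
def Claim_equal_calculate_floor : Prop := ∀ (actions : String), Dom_calculate_floor actions → Spec_calculate_floor actions (calculate_floor actions)

-- ===== LEMMAS AND PROOFS =====

-- Both sides compute 2·(count of 'U') − length; prove that characterisation for each.
theorem pvDC_eq (l : List Char) : pvDC l = 2 * (l.count 'U' : Int) - l.length := by
  induction l using pvDC.induct with
  | case1 => simp [pvDC]
  | case2 c hc => simp [pvDC, hc, List.count_cons]
  | case3 c hc => simp [pvDC, hc, List.count_cons]
  | case4 a b rest mid ih1 ih2 =>
    rw [pvDC, ih1, ih2]
    have h := List.take_append_drop ((a :: b :: rest).length / 2) (a :: b :: rest)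
    have hc : ((a :: b :: rest).count 'U' : Int)
        = (((a :: b :: rest).take ((a :: b :: rest).length / 2)).count 'U' : Int)
          + (((a :: b :: rest).drop ((a :: b :: rest).length / 2)).count 'U' : Int) := by
      conv_lhs => rw [← h]
      push_cast [List.count_append]; ring
    have hl : ((a :: b :: rest).length : Int)
        = (((a :: b :: rest).take ((a :: b :: rest).length / 2)).length : Int)
          + (((a :: b :: rest).drop ((a :: b :: rest).length / 2)).length : Int) := by
      conv_lhs => rw [← h]
      push_cast [List.length_append]; ring
    rw [hc, hl]; ring

theorem foldl_ud (l : List Char) (a : Int) :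
    l.foldl (fun floor char => if char == 'U' then floor + 1 else floor - 1) a
      = a + 2 * (l.count 'U' : Int) - l.length := by
  induction l generalizing a with
  | nil => simp
  | cons hd t ih =>
    rw [List.foldl_cons, ih]
    by_cases hc : hd = 'U' <;> simp [hc] <;> ring

-- ===== VERDICT (by name: the statement is the Claim_ definition above) =====
theorem calculate_floor_spec : Claim_equal_calculate_floor := by
  intro actions _
  unfold Spec_calculate_floor calculate_floor calculate_floor_alt
  rw [foldl_ud, pvDC_eq]; ring
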